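-- pv_equiv track=rewrite | github.com/StefanATudose/First-Year-First-Semester-Courses | ProgAlgo/Python_practice/seminare/sem4pp1.py | generarematrice
-- ===== SOURCE A (Python) =====
-- def generarematrice(n):
--     lista = []
--     for i in range(n-1):
--         lista.append([0] * n)
--     lista.append([1] * n)
--     for i in range(n):
--         lista[i][n-1] = 1
--     for i in range (n-2, -1, -1):
--         for j in range(n-2, -1, -1):
--             lista[i][j] = lista[i+1][j] + lista[i][j+1]
--     return lista
-- ===== SOURCE B (Python) =====
-- def generarematrice(n):
--     # rolling single row: build rows bottom-up by suffix-sum scans, then reverse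
--     row = [1] * n
--     rows = [row]
--     for _ in range(n - 1):
--         new = []
--         s = 0
--         for x in reversed(row):
--             s += x
--             new.append(s)
--         new.reverse()
--         rows.append(new)
--         row = new
--     rows.reverse()
--     return rows
-- ===== Notes on version B (the rewrite author's own statement) =====
-- stated objective: alternative
-- what changed: A fills an in-place n-by-n table, seeding the boundary and then adding the below and right neighbours via 2D index assignments; B keeps only a single rolling row, producing each higher row as a right-to-left running-sum (suffix-sum) scan of its predecessor, collecting the rows bottom-up and reversing the list at the end.
import Mathlib
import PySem

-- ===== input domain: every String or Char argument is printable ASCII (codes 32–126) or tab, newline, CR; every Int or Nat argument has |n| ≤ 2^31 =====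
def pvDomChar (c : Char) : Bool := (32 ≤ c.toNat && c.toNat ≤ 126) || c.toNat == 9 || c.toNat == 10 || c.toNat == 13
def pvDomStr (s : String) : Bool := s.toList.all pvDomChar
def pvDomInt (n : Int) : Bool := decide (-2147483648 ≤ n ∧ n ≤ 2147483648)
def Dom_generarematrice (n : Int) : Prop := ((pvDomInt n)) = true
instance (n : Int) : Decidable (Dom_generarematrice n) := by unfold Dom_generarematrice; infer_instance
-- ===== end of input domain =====

-- B replaces A's in-place n×n dynamic-programming table (neighbour additions via 2D indexing)
-- with a single rolling row updated by a right-to-left running-sum scan, building the rows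
-- bottom-up and reversing at the end; objective: alternative (same O(n^2) cost, no 2D mutation).

-- ===== PORT A =====
-- [0]*n / [1]*n with possibly negative n: Python yields [], matched by n.toNat (clamps to 0).
-- All pyGetD/pySetD defaults are never used: every index A touches is in range.
def generarematrice (n : Int) : List (List Int) :=
  let lista : List (List Int) :=
    (PySem.List.pyRange 0 (n-1) 1).foldl (fun L _ => L ++ [List.replicate n.toNat 0]) []
  let lista := lista ++ [List.replicate n.toNat 1]
  let lista := (PySem.List.pyRange 0 n 1).foldl
      (fun L i => PySem.List.pySetD L i (PySem.List.pySetD (PySem.List.pyGetD L i []) (n-1) 1)) lista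
  let lista := (PySem.List.pyRange (n-2) (-1) (-1)).foldl (fun L i =>
      (PySem.List.pyRange (n-2) (-1) (-1)).foldl (fun L j =>
        PySem.List.pySetD L i (PySem.List.pySetD (PySem.List.pyGetD L i []) j
          (PySem.List.pyGetD (PySem.List.pyGetD L (i+1) []) j 0 +
           PySem.List.pyGetD (PySem.List.pyGetD L i []) (j+1) 0))) L) lista
  lista

-- ===== PORT B =====
def generarematrice_alt (n : Int) : List (List Int) :=
  let row := List.replicate n.toNat (1:Int)
  let st := (PySem.List.pyRange 0 (n-1) 1).foldl
    (fun (st : List (List Int) × List Int) _ =>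
      let p := st.2.reverse.foldl
        (fun (p : List Int × Int) x => (p.1 ++ [p.2 + x], p.2 + x)) ([], 0)
      let new := p.1.reverse
      (st.1 ++ [new], new)) ([row], row)
  st.1.reverse

-- ===== PRECONDITION & SPEC =====
def Spec_generarematrice (n : Int) (out : List (List Int)) : Prop := out = generarematrice_alt n
instance (n : Int) (out : List (List Int)) : Decidable (Spec_generarematrice n out) := by unfold Spec_generarematrice; infer_instance

-- ===== CLAIM (what is proved, stated in full; the proofs are below) =====
def Claim_equal_generarematrice : Prop := ∀ (n : Int), Dom_generarematrice n → Spec_generarematrice n (generarematrice n)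

-- ===== LEMMAS AND PROOFS =====

-- suffix sums of a row: the next row of the table, entrywise (spec form)
def suffSpec (xs : List Int) : List Int := (List.range xs.length).map (fun j => (xs.drop j).sum)

-- the sequence of rows, bottom row first
def rowSeq (N : ℕ) : ℕ → List Int
  | 0 => List.replicate N 1
  | k+1 => suffSpec (rowSeq N k)

-- a not-yet-processed row of A's table after the column pass
def rowZ (N : ℕ) : List Int := (List.replicate N (0:Int)).set (N-1) 1

-- A's table when rows t..N-1 are final and rows 0..t-1 untouched
def tbl (N t : ℕ) : List (List Int) :=
  List.replicate t (rowZ N) ++ ((List.range (N - t)).map (rowSeq N)).reverse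

-- one inner-loop update of A, acting on the row alone (prev = the row below)
def rstep (prev r : List Int) (j : Int) : List Int :=
  PySem.List.pySetD r j
    (PySem.List.pyGetD prev j 0 + PySem.List.pyGetD r (j+1) 0)

theorem length_suffSpec (xs : List Int) : (suffSpec xs).length = xs.length := by
  simp [suffSpec]

theorem getElem_suffSpec (xs : List Int) (j : ℕ) (h : j < xs.length) :
    (suffSpec xs)[j]'(by simp [length_suffSpec, h]) = (xs.drop j).sum := by
  simp [suffSpec]

theorem length_rowSeq (N k : ℕ) : (rowSeq N k).length = N := by
  induction k with
  | zero => simp [rowSeq]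
  | succ k ih => simp [rowSeq, length_suffSpec, ih]

theorem drop_last_single {α} (l : List α) (N : ℕ) (hl : l.length = N) (hN : 0 < N) :
    l.drop (N-1) = [l[N-1]'(by omega)] := by
  rw [List.drop_eq_getElem_cons (by omega)]
  have : N - 1 + 1 = l.length := by omega
  simp [this]

theorem suffSpec_drop_last (xs : List Int) (N : ℕ) (hl : xs.length = N) (hN : 0 < N) :
    (suffSpec xs).drop (N-1) = [(xs.drop (N-1)).sum] := by
  rw [drop_last_single (suffSpec xs) N (by rw [length_suffSpec, hl]) hN]
  congr 1
  exact getElem_suffSpec xs (N-1) (by omega)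

theorem rowSeq_drop_last (N k : ℕ) (hN : 0 < N) :
    (rowSeq N k).drop (N-1) = [1] := by
  induction k with
  | zero =>
      simp only [rowSeq, List.drop_replicate]
      have : N - (N-1) = 1 := by omega
      simp [this]
  | succ k ih =>
      show (suffSpec (rowSeq N k)).drop (N-1) = [1]
      rw [suffSpec_drop_last _ N (length_rowSeq N k) hN, ih]
      simp

-- the running-sum loop of B computes prefix sums
theorem acc_fold (ys : List Int) : ∀ (acc : List Int) (s : Int),
    ys.foldl (fun (p : List Int × Int) x => (p.1 ++ [p.2 + x], p.2 + x)) (acc, s)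
    = (acc ++ (List.range ys.length).map (fun k => s + (ys.take (k+1)).sum), s + ys.sum) := by
  induction ys with
  | nil => simp
  | cons y ys ih =>
      intro acc s
      simp only [List.foldl_cons, ih, List.length_cons, Prod.mk.injEq]
      refine ⟨?_, by simp [add_assoc]⟩
      rw [List.range_succ_eq_map]
      simp [List.map_map, Function.comp_def, List.take_succ_cons, add_assoc]

theorem rev_map_range {α} (f : ℕ → α) (m : ℕ) :
    ((List.range m).map f).reverse = (List.range m).map (fun j => f (m-1-j)) := by
  apply List.ext_getElem
  · simp
  · intro i h1 h2
    simp only [List.getElem_reverse, List.getElem_map, List.getElem_range,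
      List.length_map, List.length_range]

-- the body of B's outer loop produces the suffix sums of the current row
theorem stepRow_eq (xs : List Int) :
    (xs.reverse.foldl (fun (p : List Int × Int) x => (p.1 ++ [p.2 + x], p.2 + x)) ([], 0)).1.reverse
    = suffSpec xs := by
  rw [acc_fold]
  simp only [List.nil_append, List.length_reverse]
  rw [rev_map_range]
  unfold suffSpec
  apply List.map_congr_left
  intro j hj
  simp only [List.mem_range] at hj
  have h1 : xs.length - 1 - j + 1 = xs.length - j := by omega
  rw [h1, zero_add, List.take_reverse]
  have h2 : xs.length - (xs.length - j) = j := by omega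
  rw [h2, List.sum_reverse]

-- B's outer fold, characterised
theorem alt_fold (N : ℕ) (js : List Int) : ∀ (k : ℕ),
    js.foldl
      (fun (st : List (List Int) × List Int) (_ : Int) =>
        (st.1 ++ [(st.2.reverse.foldl
            (fun (p : List Int × Int) x => (p.1 ++ [p.2 + x], p.2 + x)) ([], 0)).1.reverse],
         (st.2.reverse.foldl
            (fun (p : List Int × Int) x => (p.1 ++ [p.2 + x], p.2 + x)) ([], 0)).1.reverse))
      ((List.range (k+1)).map (rowSeq N), rowSeq N k)
    = ((List.range (k+1+js.length)).map (rowSeq N), rowSeq N (k+js.length)) := by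
  induction js with
  | nil => intro k; simp
  | cons j js ih =>
      intro k
      rw [List.foldl_cons]
      have hb : ((rowSeq N k).reverse.foldl
          (fun (p : List Int × Int) x => (p.1 ++ [p.2 + x], p.2 + x)) ([], 0)).1.reverse
          = rowSeq N (k+1) := stepRow_eq (rowSeq N k)
      have hflat : (List.range (k+1)).map (rowSeq N) ++ [rowSeq N (k+1)]
          = (List.range (k+1+1)).map (rowSeq N) := by
        conv_rhs => rw [List.range_succ]
        simp
      simp only [hb]
      rw [hflat, ih (k+1)]
      have h1 : k+1+1+js.length = k+1+(js.length+1) := by omega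
      have h2 : k+1+js.length = k+(js.length+1) := by omega
      rw [h1, h2]
      simp

theorem alt_eq (n : Int) (hn : 1 ≤ n) :
    generarematrice_alt n = ((List.range n.toNat).map (rowSeq n.toNat)).reverse := by
  unfold generarematrice_alt
  simp only [show List.replicate n.toNat (1:Int) = rowSeq n.toNat 0 from rfl]
  rw [show [rowSeq n.toNat 0] = (List.range (0+1)).map (rowSeq n.toNat) from by simp]
  rw [alt_fold]
  have hl : 0+1+(PySem.List.pyRange 0 (n-1) 1).length = n.toNat := by
    rw [PySem.List.length_pyRange_one]; omega
  rw [hl]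

theorem fold_append_const {α β} (l : List β) : ∀ (acc : List α) (x : α),
    l.foldl (fun L _ => L ++ [x]) acc = acc ++ List.replicate l.length x := by
  induction l with
  | nil => simp
  | cons y l ih =>
      intro acc x
      simp only [List.foldl_cons, ih, List.length_cons]
      rw [List.replicate_succ, List.append_assoc, List.singleton_append]

-- the column pass: setting entry n-1 of every row is a map
theorem setcol_fold (g : List Int → List Int) : ∀ (m : ℕ) (L : List (List Int)), m ≤ L.length →
    (PySem.List.pyRange 0 (m:Int) 1).foldl
      (fun L i => PySem.List.pySetD L i (g (PySem.List.pyGetD L i []))) L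
    = (L.take m).map g ++ L.drop m := by
  intro m
  induction m with
  | zero => intro L _; simp [PySem.List.pyRange_one_eq_nil]
  | succ m ih =>
      intro L hm
      rw [show ((m+1 : ℕ) : Int) = (m:Int)+1 by push_cast; ring]
      rw [PySem.List.pyRange_one_succ_right (by positivity)]
      rw [List.foldl_append]
      rw [ih L (by omega)]
      set T := (L.take m).map g ++ L.drop m with hT
      have hmL : m < L.length := by omega
      have hgetT : PySem.List.pyGetD T (m:Int) [] = L[m] := by
        rw [PySem.List.pyGetD_natCast]
        have : T[m]? = some L[m] := by
          rw [hT, List.getElem?_append_right (by simp <;> omega)]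
          have h0 : m - ((L.take m).map g).length = 0 := by simp <;> omega
          rw [h0, List.getElem?_drop]
          simpa using List.getElem?_eq_getElem (by omega : m + 0 < L.length)
        simp [List.getD, this]
      simp only [List.foldl_cons, List.foldl_nil, hgetT, PySem.List.pySetD_natCast]
      rw [hT, List.set_append]
      rw [if_neg (by simp <;> omega)]
      have hlen1 : m - ((L.take m).map g).length = 0 := by simp <;> omega
      rw [hlen1]
      rw [List.drop_eq_getElem_cons hmL]
      have h2 : (L[m] :: L.drop (m+1)).set 0 (g L[m]) = g L[m] :: L.drop (m+1) := rfl
      rw [h2]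
      rw [← List.take_concat_get hmL, List.concat_eq_append, List.map_append]
      simp

-- only row t changes in A's inner loop: factor the fold through the row
theorem factor (t : ℕ) (prev : List Int) (js : List Int) :
    ∀ (L : List (List Int)), L[t+1]? = some prev → t < L.length →
    js.foldl (fun L j =>
        PySem.List.pySetD L (t:Int) (PySem.List.pySetD (PySem.List.pyGetD L (t:Int) []) j
          (PySem.List.pyGetD (PySem.List.pyGetD L ((t:Int)+1) []) j 0 +
           PySem.List.pyGetD (PySem.List.pyGetD L (t:Int) []) (j+1) 0))) L
    = L.set t (js.foldl (rstep prev) (L.getD t [])) := by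
  induction js with
  | nil =>
      intro L _ ht
      simp [List.getD, List.getElem?_eq_getElem ht, List.set_getElem_self]
  | cons j js ih =>
      intro L hprev ht
      simp only [List.foldl_cons]
      have hget : PySem.List.pyGetD L (t:Int) [] = L.getD t [] := by
        rw [PySem.List.pyGetD_natCast]
      have hget1 : PySem.List.pyGetD L ((t:Int)+1) [] = prev := by
        rw [show ((t:Int)+1) = ((t+1:ℕ):Int) by push_cast; ring]
        rw [PySem.List.pyGetD_natCast]
        simp [List.getD, hprev]
      rw [hget, hget1, PySem.List.pySetD_natCast]
      have hstep : PySem.List.pySetD (L.getD t []) j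
          (PySem.List.pyGetD prev j 0 + PySem.List.pyGetD (L.getD t []) (j+1) 0)
          = rstep prev (L.getD t []) j := rfl
      rw [hstep]
      set v := rstep prev (L.getD t []) j with hv
      rw [ih (L.set t v) (by rw [List.getElem?_set_ne (by omega)]; exact hprev)
            (by simp [ht])]
      have hgv : (L.set t v).getD t [] = v := by
        simp [List.getD, List.getElem?_set_self ht]
      rw [hgv, List.set_set]

-- A's inner loop turns the unfinished row into the suffix sums of the row below
theorem row_fold (N : ℕ) (prev : List Int) (hp : prev.length = N) :
    ∀ (t : ℕ) (a : List Int), a.length = t → t < N →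
    (PySem.List.pyRange ((t:Int)-1) (-1) (-1)).foldl (rstep prev)
        (a ++ (suffSpec prev).drop t)
    = suffSpec prev := by
  intro t
  induction t with
  | zero =>
      intro a ha _
      rw [List.length_eq_zero_iff.mp ha]
      rw [PySem.List.pyRange_neg_one_eq_nil (by norm_num)]
      simp
  | succ t ih =>
      intro a ha htN
      rcases List.eq_nil_or_concat a with h | ⟨b, x, rfl⟩
      · rw [h] at ha; simp at ha
      rw [List.concat_eq_append] at ha ⊢
      have hb : b.length = t := by simp at ha; omega
      rw [show ((t+1:ℕ):Int) - 1 = (t:Int) by push_cast; ring]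
      rw [PySem.List.pyRange_neg_one_cons (by omega)]
      rw [List.foldl_cons]
      have hlsS : (suffSpec prev).length = N := by rw [length_suffSpec, hp]
      set cur := b ++ [x] ++ (suffSpec prev).drop (t+1) with hcur
      have hlcur : cur.length = N := by
        simp [hcur, hlsS]
        omega
      have hgp : PySem.List.pyGetD prev (t:Int) 0 = prev[t]'(by omega) := by
        rw [PySem.List.pyGetD_natCast]
        simp [List.getD, List.getElem?_eq_getElem (by omega : t < prev.length)]
      have hgc : PySem.List.pyGetD cur ((t:Int)+1) 0 = (suffSpec prev)[t+1]'(by omega) := by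
        rw [show ((t:Int)+1) = ((t+1:ℕ):Int) by push_cast; ring]
        rw [PySem.List.pyGetD_natCast]
        have h1 : cur[t+1]? = some ((suffSpec prev)[t+1]'(by omega)) := by
          rw [hcur, List.getElem?_append_right (by simp <;> omega)]
          have h0 : t + 1 - (b ++ [x]).length = 0 := by simp <;> omega
          rw [h0, List.getElem?_drop]
          exact List.getElem?_eq_getElem (by omega)
        simp [List.getD, h1]
      have hval : prev[t]'(by omega) + (suffSpec prev)[t+1]'(by omega)
          = (suffSpec prev)[t]'(by omega) := by
        rw [getElem_suffSpec _ _ (by omega), getElem_suffSpec _ _ (by omega)]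
        conv_rhs => rw [List.drop_eq_getElem_cons (by omega : t < prev.length)]
        rw [List.sum_cons]
      show (PySem.List.pyRange ((t:Int)-1) (-1) (-1)).foldl (rstep prev) (rstep prev cur (t:Int))
          = suffSpec prev
      unfold rstep
      rw [hgp, hgc, PySem.List.pySetD_natCast, hval]
      rw [hcur, List.set_append]
      rw [if_pos (by simp <;> omega)]
      rw [List.set_append]
      rw [if_neg (by omega)]
      have hbl : t - b.length = 0 := by omega
      rw [hbl]
      have h1 : ([x].set 0 ((suffSpec prev)[t]'(by omega))) = [(suffSpec prev)[t]'(by omega)] := rfl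
      rw [h1]
      have h2 : (b ++ [(suffSpec prev)[t]'(by omega)]) ++ (suffSpec prev).drop (t+1)
          = b ++ (suffSpec prev).drop t := by
        rw [List.drop_eq_getElem_cons (by omega : t < (suffSpec prev).length)]
        simp
      rw [h2]
      exact ih b hb (by omega)

-- the inner loop on the unfinished row rowZ yields the next row of the sequence
theorem inner_result (N k : ℕ) (hN : 0 < N) :
    (PySem.List.pyRange (((N-1:ℕ):Int)-1) (-1) (-1)).foldl (rstep (rowSeq N k)) (rowZ N)
    = rowSeq N (k+1) := by
  have hlz : (rowZ N).length = N := by simp [rowZ]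
  have hstate : rowZ N = (rowZ N).take (N-1) ++ (suffSpec (rowSeq N k)).drop (N-1) := by
    have hd : (suffSpec (rowSeq N k)).drop (N-1) = [1] := by
      rw [suffSpec_drop_last _ N (length_rowSeq N k) hN, rowSeq_drop_last N k hN]
      simp
    have hz : (rowZ N).drop (N-1) = [1] := by
      rw [drop_last_single _ N hlz hN]
      congr 1
      exact List.getElem_set_self (by simp [rowZ]; omega)
    rw [hd, ← hz, List.take_append_drop]
  conv_lhs => rw [hstate]
  rw [row_fold N (rowSeq N k) (length_rowSeq N k) (N-1) _ (by simp [hlz]) (by omega)]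
  rfl

-- the outer loop of A: rows t..N-1 final, finish the remaining t rows
theorem outer_fold (n : Int) (hn : 1 ≤ n) : ∀ (t : ℕ), t ≤ n.toNat - 1 →
    (PySem.List.pyRange ((t:Int)-1) (-1) (-1)).foldl (fun L i =>
      (PySem.List.pyRange (n-2) (-1) (-1)).foldl (fun L j =>
        PySem.List.pySetD L i (PySem.List.pySetD (PySem.List.pyGetD L i []) j
          (PySem.List.pyGetD (PySem.List.pyGetD L (i+1) []) j 0 +
           PySem.List.pyGetD (PySem.List.pyGetD L i []) (j+1) 0))) L)
      (tbl n.toNat t)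
    = tbl n.toNat 0 := by
  intro t
  induction t with
  | zero =>
      intro _
      rw [show PySem.List.pyRange (((0:ℕ):Int)-1) (-1) (-1) = []
        from PySem.List.pyRange_neg_one_eq_nil (by norm_num)]
      simp
  | succ t ih =>
      intro ht
      have hN2 : t + 2 ≤ n.toNat := by omega
      set N := n.toNat with hNdef
      rw [show ((t+1:ℕ):Int) - 1 = (t:Int) by push_cast; ring]
      rw [show PySem.List.pyRange ((t:Int)) (-1) (-1) = (t:Int) :: PySem.List.pyRange ((t:Int)-1) (-1) (-1)
        from PySem.List.pyRange_neg_one_cons (by omega)]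
      rw [List.foldl_cons]
      set prev := rowSeq N (N-t-2) with hprevdef
      set R := ((List.range (N-(t+1))).map (rowSeq N)).reverse with hRdef
      have hlR : R.length = N - t - 1 := by simp [hRdef]; omega
      have htbl : tbl N (t+1) = List.replicate (t+1) (rowZ N) ++ R := rfl
      have hget1 : (tbl N (t+1))[t+1]? = some prev := by
      -- row t+1 is the most recently finished row
        rw [htbl, List.getElem?_append_right (by simp)]
        have h0 : t + 1 - (List.replicate (t+1) (rowZ N)).length = 0 := by simp
        rw [h0, List.getElem?_eq_getElem (by omega)]
        simp only [hRdef, hprevdef, List.getElem_reverse, List.getElem_map,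
          List.getElem_range, List.length_reverse, List.length_map, List.length_range,
          Option.some.injEq]
        have h4 : N - (t+1) - 1 - 0 = N - t - 2 := by omega
        rw [h4]
      rw [factor t prev _ (tbl N (t+1)) hget1 (by rw [htbl]; simp [hlR] <;> omega)]
      have hgett : (tbl N (t+1)).getD t [] = rowZ N := by
        rw [htbl, List.getD, List.getElem?_append_left (by simp)]
        simp
      rw [hgett]
      have hrange : n - 2 = ((N-1:ℕ):Int) - 1 := by
        have : (N:Int) = n := Int.toNat_of_nonneg (by omega)
        omega
      have hinner : (PySem.List.pyRange (n-2) (-1) (-1)).foldl (rstep prev) (rowZ N)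
          = rowSeq N (N-t-1) := by
        rw [hrange, hprevdef, inner_result N (N-t-2) (by omega)]
        have hrs : N - t - 2 + 1 = N - t - 1 := by omega
        rw [hrs]
      rw [hinner]
      have hset : (tbl N (t+1)).set t (rowSeq N (N-t-1)) = tbl N t := by
        rw [htbl, List.replicate_succ', List.append_assoc, List.set_append]
        rw [if_neg (by simp)]
        have h0 : t - (List.replicate t (rowZ N)).length = 0 := by simp
        rw [h0]
        have h1 : (([rowZ N] ++ R).set 0 (rowSeq N (N-t-1))) = rowSeq N (N-t-1) :: R := rfl
        rw [h1]
        show List.replicate t (rowZ N) ++ (rowSeq N (N-t-1) :: R) = tbl N t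
        unfold tbl
        congr 1
        have h2 : N - t = (N - t - 1) + 1 := by omega
        rw [h2, List.range_succ]
        have h3 : N - (t+1) = N - t - 1 := by omega
        simp [hRdef, h3]
      rw [hset]
      exact ih (by omega)

theorem A_eq (n : Int) (hn : 1 ≤ n) : generarematrice n = tbl n.toNat 0 := by
  simp only [generarematrice]
  rw [fold_append_const]
  simp only [List.nil_append]
  set N := n.toNat with hNdef
  have hnN : n = ((N:ℕ):Int) := (Int.toNat_of_nonneg (by omega)).symm
  rw [PySem.List.length_pyRange_one]
  have hl1 : (n - 1 - 0).toNat = N - 1 := by omega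
  rw [hl1]
  set L1 := List.replicate (N-1) (List.replicate N (0:Int)) ++ [List.replicate N (1:Int)]
    with hL1
  have hlL1 : L1.length = N := by simp [hL1]; omega
  have hsetcol := setcol_fold (fun r => PySem.List.pySetD r (((N:ℕ):Int)-1) 1) N L1 (by omega)
  have hstep2 : (PySem.List.pyRange 0 n 1).foldl
      (fun L i => PySem.List.pySetD L i (PySem.List.pySetD (PySem.List.pyGetD L i []) (n-1) 1)) L1
      = tbl N (N-1) := by
    rw [hnN]
    rw [hsetcol]
    rw [List.take_of_length_le (by omega), List.drop_of_length_le (by omega)]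
    rw [hL1, List.map_append, List.map_replicate]
    have hg1 : PySem.List.pySetD (List.replicate N (0:Int)) (((N:ℕ):Int)-1) 1 = rowZ N := by
      rw [show ((N:ℕ):Int) - 1 = ((N-1:ℕ):Int) by push_cast; omega]
      rw [PySem.List.pySetD_natCast]
      rfl
    have hg2 : PySem.List.pySetD (List.replicate N (1:Int)) (((N:ℕ):Int)-1) 1
        = List.replicate N 1 := by
      rw [show ((N:ℕ):Int) - 1 = ((N-1:ℕ):Int) by push_cast; omega]
      rw [PySem.List.pySetD_natCast, List.set_replicate_self]
    simp only [hg1, List.map_cons, List.map_nil, hg2]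
    unfold tbl
    have h2 : N - (N-1) = 1 := by omega
    rw [h2]
    simp [rowSeq]
  rw [hstep2]
  have hrange : n - 2 = (((N-1:ℕ)):Int) - 1 := by omega
  have H := outer_fold n hn (N-1) (by omega)
  rw [← hrange] at H
  exact H

theorem both_trivial (n : Int) (hn : n ≤ 0) :
    generarematrice n = generarematrice_alt n := by
  unfold generarematrice generarematrice_alt
  rw [PySem.List.pyRange_one_eq_nil (by omega), PySem.List.pyRange_one_eq_nil (by omega),
    PySem.List.pyRange_neg_one_eq_nil (by omega)]
  simp

-- ===== VERDICT (by name: the statement is the Claim_ definition above) =====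
theorem generarematrice_spec : Claim_equal_generarematrice := by
  intro n _
  unfold Spec_generarematrice
  rcases le_or_gt 1 n with h | h
  · rw [A_eq n h, alt_eq n h]
    unfold tbl
    simp
  · exact both_trivial n (by omega)
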